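-- pv_equiv track=rewrite | github.com/tuhuuxxx/Learning-Python | Ki Ba Lan.py | convert_unary_to_binary_op
-- ===== SOURCE A (Python) =====
-- def is_Operator(ch):
--     return ch in ['*', '/', '+', '-']
--
-- def check_unary_operator(s):
--     result = []
--     for i in range(len(s)):
--         if (i==0 and (s[i]=='+' or s[i]=='-')) or (is_Operator(s[i-1]) and (s[i]=='+' or s[i]=='-')) or (s[i-1]=='(' and (s[i]=='+' or s[i]=='-')):
--             result.append('true')
--         else:
--             result.append('false')
--     return result
--
-- def convert_unary_to_binary_op(s):
--     result = check_unary_operator(s)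
--     new_str = ''
--
--     for i in range(len(s)):
--         if result[i] == 'true':
--             if s[i] == '-':
--                 new_str = new_str + '(0-1)*'
--             else:    # s[i] == '-'
--                 pass
--         else:
--             new_str = new_str + s[i]
--     return new_str
-- ===== SOURCE B (Python) =====
-- def convert_unary_to_binary_op(s):
--     pieces = []
--     i, n = 0, len(s)
--     while i < n:
--         c = s[i]
--         if c in '+-':
--             # maximal run of sign characters s[i:j]
--             j = i
--             while j < n and s[j] in '+-':
--                 j += 1
--             if not (i == 0 or s[i - 1] in '*/('):
--                 # first sign of the run is a binary operator; keep it
--                 pieces.append(c)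
--                 i += 1
--             # every remaining sign of the run is unary
--             pieces.extend('(0-1)*' for k in range(i, j) if s[k] == '-')
--             i = j
--         else:
--             pieces.append(c)
--             i += 1
--     return ''.join(pieces)
-- ===== Notes on version B (the rewrite author's own statement) =====
-- stated objective: faster
-- what changed: Instead of A's per-character marker list (with a previous-character lookup and a string concatenation at every position), B is a skip-ahead scanner over maximal runs of sign characters: each run is consumed as one block with a single boundary test for its first sign (start of string or a preceding star, slash or open parenthesis), every later sign of the run being unary by construction, and the output is assembled by joining collected pieces.
import Mathlib
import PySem

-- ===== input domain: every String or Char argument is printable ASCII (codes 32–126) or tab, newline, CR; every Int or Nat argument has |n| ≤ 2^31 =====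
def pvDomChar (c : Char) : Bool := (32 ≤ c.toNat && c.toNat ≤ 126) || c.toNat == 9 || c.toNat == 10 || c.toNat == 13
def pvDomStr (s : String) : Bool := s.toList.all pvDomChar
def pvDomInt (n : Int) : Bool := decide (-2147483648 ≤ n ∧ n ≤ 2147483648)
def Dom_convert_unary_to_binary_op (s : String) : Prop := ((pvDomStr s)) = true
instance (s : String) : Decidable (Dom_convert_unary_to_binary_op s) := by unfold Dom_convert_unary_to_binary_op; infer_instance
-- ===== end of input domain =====

-- B replaces A's per-character marker list by a skip-ahead scanner over maximal runs of
-- sign characters: one boundary test per run, all later signs of a run unary by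
-- construction, pieces joined at the end (objective: faster, constant factor, measured).

-- ===== PORT A =====
def pv_is_Operator (c : Char) : Bool := ['*', '/', '+', '-'].contains c

-- for i in range(len(s)): append 'true'/'false'.  s[i] and s[i-1] are always in range
-- (i-1 = -1 wraps to the last character in Python), so pyGetD is exact here.
def pv_check_unary (cs : List Char) : List String :=
  (PySem.List.pyRange 0 cs.length 1).foldl (fun result i =>
    let si : Char := PySem.List.pyGetD cs i ' '
    let sp : Char := PySem.List.pyGetD cs (i - 1) ' '
    result ++ [if ((i == 0 && (si == '+' || si == '-'))
                  || (pv_is_Operator sp && (si == '+' || si == '-'))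
                  || (sp == '(' && (si == '+' || si == '-'))) then "true" else "false"]) []

def convert_unary_to_binary_op (s : String) : String :=
  let cs := s.toList
  let result := pv_check_unary cs
  String.ofList ((PySem.List.pyRange 0 cs.length 1).foldl (fun new_str i =>
    if PySem.List.pyGetD result i "" == "true" then
      (if PySem.List.pyGetD cs i ' ' == '-' then new_str ++ ['(', '0', '-', '1', ')', '*']
       else new_str)
    else new_str ++ [PySem.List.pyGetD cs i ' ']) [])

-- ===== PORT B =====
def pvIsSign (c : Char) : Bool := c == '+' || c == '-'

-- '(0-1)*' for a unary '-', nothing for a unary '+'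
def pvEmit (c : Char) : List Char := if c == '-' then ['(', '0', '-', '1', ')', '*'] else []

-- the while loop of Source B: b tells whether the current position is a unary boundary
-- (start of string, or the previous character was one of * / ().  On a sign we take the
-- whole maximal run at once: its first sign is kept literally unless b, the rest is
-- emitted as unary; the position after the run is never a boundary (prev is a sign,
-- and Source B's test 's[i-1] in ''*/('' ' is false there, but that head is non-sign anyway).
def convert_unary_to_binary_op_altGo (b : Bool) : List Char → List Char
  | [] => []
  | c :: rest =>
    if pvIsSign c then
      (if b then pvEmit c else [c])
        ++ (rest.takeWhile pvIsSign).flatMap pvEmit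
        ++ convert_unary_to_binary_op_altGo false (rest.dropWhile pvIsSign)
    else
      c :: convert_unary_to_binary_op_altGo (['*', '/', '('].contains c) rest
termination_by cs => cs.length
decreasing_by
  · have := List.length_dropWhile_le pvIsSign rest
    simp only [List.length_cons]
    omega
  · simp

def convert_unary_to_binary_op_alt (s : String) : String :=
  String.ofList (convert_unary_to_binary_op_altGo true s.toList)

-- ===== PRECONDITION & SPEC =====
def Spec_convert_unary_to_binary_op (s : String) (out : String) : Prop := out = convert_unary_to_binary_op_alt s
instance (s : String) (out : String) : Decidable (Spec_convert_unary_to_binary_op s out) := by unfold Spec_convert_unary_to_binary_op; infer_instance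

-- ===== CLAIM (what is proved, stated in full; the proofs are below) =====
def Claim_equal_convert_unary_to_binary_op : Prop := ∀ (s : String), Dom_convert_unary_to_binary_op s → Spec_convert_unary_to_binary_op s (convert_unary_to_binary_op s)

-- ===== LEMMAS AND PROOFS =====

-- common closed form: the (previous char, current char) pairs, and the emitted piece per pair
def pvCond (prev : Option Char) (c : Char) : Bool :=
  match prev with
  | none => c == '+' || c == '-'
  | some p => (c == '+' || c == '-') && (pv_is_Operator p || p == '(')

def pvPiece (prev : Option Char) (c : Char) : List Char :=
  if pvCond prev c then (if c == '-' then ['(', '0', '-', '1', ')', '*'] else []) else [c]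

def pvPairs (cs : List Char) : List (Option Char × Char) := (none :: cs.map some).zip cs

-- F prev cs: the flatMap of pvPiece over the (prev,char) pairs of cs continued after prev
def pvF (prev : Option Char) (cs : List Char) : List Char :=
  ((prev :: cs.map some).zip cs).flatMap (fun pc => pvPiece pc.1 pc.2)

theorem pvF_nil (prev : Option Char) : pvF prev [] = [] := by simp [pvF]

theorem pvF_cons (prev : Option Char) (c : Char) (rest : List Char) :
    pvF prev (c :: rest) = pvPiece prev c ++ pvF (some c) rest := by
  simp [pvF]

theorem pvPairs_length (cs : List Char) : (pvPairs cs).length = cs.length := by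
  simp [pvPairs]

theorem pvPairs_getElem (cs : List Char) (n : Nat) (hn : n < cs.length) :
    (pvPairs cs)[n]'(by simpa [pvPairs_length]) =
      ((if h : n = 0 then none else some (cs[n-1]'(by omega))), cs[n]'hn) := by
  have h1 : n < (none :: cs.map some).length := by simp; omega
  simp [pvPairs, List.getElem_zip]
  split
  · subst ‹n = 0›; simp
  · rcases Nat.exists_eq_succ_of_ne_zero ‹n ≠ 0› with ⟨k, rfl⟩
    simp

-- A-side mark at index n equals pvCond of the pair
theorem pvMark_eq (cs : List Char) (n : Nat) (hn : n < cs.length) :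
    (let si : Char := PySem.List.pyGetD cs (n : Int) ' '
     let sp : Char := PySem.List.pyGetD cs ((n : Int) - 1) ' '
     (((n : Int) == 0 && (si == '+' || si == '-'))
        || (pv_is_Operator sp && (si == '+' || si == '-'))
        || (sp == '(' && (si == '+' || si == '-')))) =
      pvCond ((pvPairs cs)[n]'(by simpa [pvPairs_length])).1 ((pvPairs cs)[n]'(by simpa [pvPairs_length])).2 := by
  rw [pvPairs_getElem cs n hn]
  have hsi : PySem.List.pyGetD cs (n : Int) ' ' = cs[n]'hn := by
    simp [PySem.List.pyGetD_natCast, List.getD_eq_getElem?_getD, hn]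
  cases n with
  | zero =>
    simp only [hsi]
    simp only [Nat.cast_zero]
    cases hx : (cs[0]'hn == '+' || cs[0]'hn == '-') <;>
      simp [pvCond, hx]
  | succ k =>
    have hsp : PySem.List.pyGetD cs ((k + 1 : Nat) - 1 : Int) ' ' = cs[k]'(by omega) := by
      have : ((k + 1 : Nat) : Int) - 1 = (k : Int) := by push_cast; ring
      rw [this]
      simp [PySem.List.pyGetD_natCast, List.getD_eq_getElem?_getD, (by omega : k < cs.length)]
    simp only [hsi, hsp]
    have h0 : (((k + 1 : Nat) : Int) == 0) = false := by
      simp only [beq_eq_false_iff_ne, ne_eq]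
      omega
    rw [h0]
    cases hx : (cs[k+1]'hn == '+' || cs[k+1]'hn == '-') <;>
    cases ho : pv_is_Operator (cs[k]'(by omega)) <;>
      simp [pvCond, hx, ho]

-- check_unary computes the marks of pvCond over the pairs (prefix-generalised)
theorem check_unary_take (cs : List Char) (n : Nat) (hn : n ≤ cs.length) :
    (PySem.List.pyRange 0 (n : Int) 1).foldl (fun result i =>
      let si : Char := PySem.List.pyGetD cs i ' '
      let sp : Char := PySem.List.pyGetD cs (i - 1) ' '
      result ++ [if ((i == 0 && (si == '+' || si == '-'))
                  || (pv_is_Operator sp && (si == '+' || si == '-'))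
                  || (sp == '(' && (si == '+' || si == '-'))) then "true" else "false"]) [] =
    ((pvPairs cs).take n).map (fun pc => if pvCond pc.1 pc.2 then "true" else "false") := by
  induction n with
  | zero => simp
  | succ m ih =>
    have hm : m < cs.length := by omega
    have hr : (PySem.List.pyRange 0 ((m + 1 : Nat) : Int) 1) =
        (PySem.List.pyRange 0 (m : Int) 1) ++ [(m : Int)] := by
      have : ((m + 1 : Nat) : Int) = (m : Int) + 1 := by push_cast; ring
      rw [this, PySem.List.pyRange_one_succ_right (by positivity)]
    rw [hr, List.foldl_append, ih (by omega)]
    have htake : (pvPairs cs).take (m + 1) = (pvPairs cs).take m ++ [(pvPairs cs)[m]'(by simpa [pvPairs_length])] := by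
      rw [List.take_succ]
      simp [List.getElem?_eq_getElem (by simpa [pvPairs_length] : m < (pvPairs cs).length)]
    rw [htake, List.map_append, List.map_cons, List.map_nil]
    simp only [List.foldl_cons, List.foldl_nil]
    congr 1
    have := pvMark_eq cs m hm
    simp only at this
    rw [this]

theorem check_unary_eq (cs : List Char) :
    pv_check_unary cs = (pvPairs cs).map (fun pc => if pvCond pc.1 pc.2 then "true" else "false") := by
  have h := check_unary_take cs cs.length (le_refl _)
  rw [List.take_of_length_le (by simp [pvPairs_length])] at h
  simpa [pv_check_unary] using h

-- convert's main loop computes the flatMap of pvPiece over the pairs (prefix-generalised)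
theorem convert_take (cs : List Char) (n : Nat) (hn : n ≤ cs.length) :
    (PySem.List.pyRange 0 (n : Int) 1).foldl (fun new_str i =>
      if PySem.List.pyGetD (pv_check_unary cs) i "" == "true" then
        (if PySem.List.pyGetD cs i ' ' == '-' then new_str ++ ['(', '0', '-', '1', ')', '*']
         else new_str)
      else new_str ++ [PySem.List.pyGetD cs i ' ']) [] =
    ((pvPairs cs).take n).flatMap (fun pc => pvPiece pc.1 pc.2) := by
  induction n with
  | zero => simp
  | succ m ih =>
    have hm : m < cs.length := by omega
    have hmp : m < (pvPairs cs).length := by simpa [pvPairs_length]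
    have hr : (PySem.List.pyRange 0 ((m + 1 : Nat) : Int) 1) =
        (PySem.List.pyRange 0 (m : Int) 1) ++ [(m : Int)] := by
      have : ((m + 1 : Nat) : Int) = (m : Int) + 1 := by push_cast; ring
      rw [this, PySem.List.pyRange_one_succ_right (by positivity)]
    rw [hr, List.foldl_append, ih (by omega)]
    have htake : (pvPairs cs).take (m + 1) = (pvPairs cs).take m ++ [(pvPairs cs)[m]'hmp] := by
      rw [List.take_succ]
      simp [List.getElem?_eq_getElem hmp]
    rw [htake, List.flatMap_append, List.flatMap_cons, List.flatMap_nil, List.append_nil]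
    simp only [List.foldl_cons, List.foldl_nil]
    have hres : PySem.List.pyGetD (pv_check_unary cs) (m : Int) "" =
        (if pvCond ((pvPairs cs)[m]'hmp).1 ((pvPairs cs)[m]'hmp).2 then "true" else "false") := by
      rw [check_unary_eq]
      simp [PySem.List.pyGetD_natCast, List.getD_eq_getElem?_getD,
        List.getElem?_map, List.getElem?_eq_getElem hmp]
    have hsi : PySem.List.pyGetD cs (m : Int) ' ' = cs[m]'hm := by
      simp [PySem.List.pyGetD_natCast, List.getD_eq_getElem?_getD, hm]
    have hc2 : ((pvPairs cs)[m]'hmp).2 = cs[m]'hm := by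
      rw [pvPairs_getElem cs m hm]
    rw [hres, hsi]
    cases hC : pvCond ((pvPairs cs)[m]'hmp).1 ((pvPairs cs)[m]'hmp).2 with
    | true =>
      simp only [hC, if_true]
      rw [if_pos (by decide : (("true" == "true")) = true)]
      simp only [pvPiece, hC, if_true]
      rw [hc2]
      by_cases hd : (cs[m]'hm == '-') = true
      · rw [if_pos hd, if_pos hd]
      · rw [if_neg hd, if_neg hd, List.append_nil]
    | false =>
      simp only [hC, Bool.false_eq_true, if_false]
      rw [if_neg (by decide : ¬ (("false" == "true")) = true)]
      simp only [pvPiece, hC, Bool.false_eq_true, if_false]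
      rw [hc2]

theorem A_eq_pvF (s : String) :
    convert_unary_to_binary_op s = String.ofList (pvF none s.toList) := by
  unfold convert_unary_to_binary_op
  have h := convert_take s.toList s.toList.length (le_refl _)
  rw [List.take_of_length_le (by simp [pvPairs_length])] at h
  exact congrArg String.ofList h

-- B side --------------------------------------------------------------------

-- a sign's piece after a sign is always the unary emission
theorem pvPiece_sign_after_sign (p c : Char) (hp : pvIsSign p = true) (hc : pvIsSign c = true) :
    pvPiece (some p) c = pvEmit c := by
  simp only [pvIsSign, Bool.or_eq_true, beq_iff_eq] at hp hc
  have hop : pv_is_Operator p = true := by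
    rcases hp with h | h <;> subst h <;> decide
  simp [pvPiece, pvCond, pvEmit, hop, hc]

theorem head_dropWhile_not_sign (l : List Char) (x : Char) (xs : List Char)
    (h : l.dropWhile pvIsSign = x :: xs) : pvIsSign x = false := by
  induction l with
  | nil => simp [List.dropWhile] at h
  | cons a l ih =>
    by_cases ha : pvIsSign a = true
    · rw [List.dropWhile_cons_of_pos ha] at h; exact ih h
    · rw [List.dropWhile_cons_of_neg ha] at h
      cases h; simpa using ha

-- inside a run: pvF after a sign prev splits into the run's unary emissions and a tail
theorem pvF_run (rest : List Char) (p : Char) (hp : pvIsSign p = true) :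
    ∃ q, pvIsSign q = true ∧
      pvF (some p) rest =
        (rest.takeWhile pvIsSign).flatMap pvEmit ++ pvF (some q) (rest.dropWhile pvIsSign) := by
  induction rest generalizing p with
  | nil => exact ⟨p, hp, by simp [pvF_nil]⟩
  | cons d rest ih =>
    by_cases hd : pvIsSign d = true
    · obtain ⟨q, hq, hF⟩ := ih d hd
      refine ⟨q, hq, ?_⟩
      rw [pvF_cons, List.takeWhile_cons_of_pos hd, List.dropWhile_cons_of_pos hd,
        pvPiece_sign_after_sign p d hp hd, hF, List.flatMap_cons, List.append_assoc]
    · refine ⟨p, hp, ?_⟩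
      rw [List.takeWhile_cons_of_neg hd, List.dropWhile_cons_of_neg hd]
      simp

-- the skip-ahead scanner computes pvF whenever b correctly summarises the boundary
theorem altGo_eq_pvF : ∀ (n : Nat) (cs : List Char), cs.length ≤ n → ∀ (prev : Option Char) (b : Bool),
    (∀ c rest, cs = c :: rest → pvIsSign c = true → b = pvCond prev c) →
    convert_unary_to_binary_op_altGo b cs = pvF prev cs := by
  intro n
  induction n with
  | zero =>
    intro cs hlen prev b _
    have : cs = [] := List.eq_nil_of_length_eq_zero (by omega)
    subst this
    simp [convert_unary_to_binary_op_altGo, pvF_nil]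
  | succ m ih =>
    intro cs hlen prev b hb
    match cs with
    | [] => simp [convert_unary_to_binary_op_altGo, pvF_nil]
    | c :: rest =>
      by_cases hc : pvIsSign c = true
      · obtain ⟨q, hq, hF⟩ := pvF_run rest c hc
        have htail : convert_unary_to_binary_op_altGo false (rest.dropWhile pvIsSign) =
            pvF (some q) (rest.dropWhile pvIsSign) := by
          apply ih
          · have := List.length_dropWhile_le pvIsSign rest
            simp only [List.length_cons] at hlen
            omega
          · intro d ds hds hdsign
            exact absurd hdsign (by simp [head_dropWhile_not_sign rest d ds hds])
        have hhead : (if b = true then pvEmit c else [c]) = pvPiece prev c := by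
          rw [hb c rest rfl hc]
          cases hC : pvCond prev c <;> simp [pvPiece, pvEmit, hC]
        rw [convert_unary_to_binary_op_altGo, if_pos hc, pvF_cons, hF, htail, hhead,
          List.append_assoc]
      · simp only [Bool.not_eq_true] at hc
        have h1 : (c == '+') = false := by
          simp only [pvIsSign, Bool.or_eq_false_iff] at hc; exact hc.1
        have h2 : (c == '-') = false := by
          simp only [pvIsSign, Bool.or_eq_false_iff] at hc; exact hc.2
        have hpiece : pvPiece prev c = [c] := by
          have hCf : pvCond prev c = false := by
            cases prev <;> simp [pvCond, h1, h2]
          simp [pvPiece, hCf]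
        have htail : convert_unary_to_binary_op_altGo (['*', '/', '('].contains c) rest =
            pvF (some c) rest := by
          apply ih
          · simp only [List.length_cons] at hlen; omega
          · intro d ds hds hdsign
            simp only [pvIsSign] at hdsign
            simp only [pvCond, hdsign, Bool.true_and, pv_is_Operator,
              List.contains_cons, List.contains_nil, Bool.or_false]
            rw [h1, h2]
            cases hs : (c == '*') <;> cases ht : (c == '/') <;> cases hp : (c == '(') <;> simp
        rw [convert_unary_to_binary_op_altGo, if_neg (by simp [hc]), pvF_cons, hpiece, htail]
        simp

theorem B_eq_pvF (s : String) :
    convert_unary_to_binary_op_alt s = String.ofList (pvF none s.toList) := by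
  unfold convert_unary_to_binary_op_alt
  congr 1
  apply altGo_eq_pvF s.toList.length s.toList (le_refl _) none
  intro c rest _ hcsign
  simp only [pvCond]
  simp only [pvIsSign] at hcsign
  exact hcsign.symm

-- ===== VERDICT (by name: the statement is the Claim_ definition above) =====
theorem convert_unary_to_binary_op_spec : Claim_equal_convert_unary_to_binary_op := by
  intro s _
  unfold Spec_convert_unary_to_binary_op
  rw [A_eq_pvF, B_eq_pvF]
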